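-- pv_equiv track=rewrite | github.com/PrithwishJana/CoTran | transpilers/TSS_CodeConv_PyTranslations/1191/GFG.py | largestPalinSub
-- ===== SOURCE A (Python) =====
-- def largestPalinSub(s):
--     res = ""
--     mx = s[0]
--     i = 1
--     while i < len(s):
--         mx = chr(max(ord(mx), ord(s[i])))
--         i += 1
--     i = 0
--     while i < len(s):
--         if s[i] == mx:
--             res += s[i]
--         i += 1
--     return res
-- ===== SOURCE B (Python) =====
-- def largestPalinSub(s):
--     mx = s[0]
--     res = s[0]
--     for c in s[1:]:
--         if c > mx:
--             mx = c
--             res = c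
--         elif c == mx:
--             res += c
--     return res
-- ===== Notes on version B (the rewrite author's own statement) =====
-- stated objective: faster
-- what changed: Single fused pass with reset-on-larger-char replaces A's two separate index-based while loops (one computing the max char via chr(max(ord,ord)) per element, one collecting matches).
import Mathlib
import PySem

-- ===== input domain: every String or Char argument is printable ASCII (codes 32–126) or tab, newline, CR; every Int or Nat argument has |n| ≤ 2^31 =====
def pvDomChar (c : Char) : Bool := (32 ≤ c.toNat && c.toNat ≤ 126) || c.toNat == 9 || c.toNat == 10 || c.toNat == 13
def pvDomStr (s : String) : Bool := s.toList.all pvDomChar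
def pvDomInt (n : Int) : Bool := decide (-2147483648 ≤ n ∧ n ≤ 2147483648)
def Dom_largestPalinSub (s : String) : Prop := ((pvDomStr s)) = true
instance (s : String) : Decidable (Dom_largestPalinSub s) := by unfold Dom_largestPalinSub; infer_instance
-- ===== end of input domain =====

-- B fuses A's two while loops into one pass that resets the accumulator when a larger char appears; same result, one pass.

-- ===== PORT A =====
-- first while loop: mx = chr(max(ord(mx), ord(s[i])))
def pvAMax : Char → List Char → Char
  | mx, [] => mx
  | mx, c :: t => pvAMax (Char.ofNat (max mx.toNat c.toNat)) t

-- second while loop: res += s[i] if s[i] == mx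
def pvAFilter : List Char → Char → List Char
  | [], _ => []
  | c :: t, mx => if c == mx then c :: pvAFilter t mx else pvAFilter t mx

def largestPalinSub (s : String) : String :=
  match s.toList with
  | [] => ""  -- s[0] raises IndexError here; excluded by Pre_
  | c0 :: t => String.mk (pvAFilter (c0 :: t) (pvAMax c0 t))

-- ===== PORT B =====
def pvBLoop : List Char → Char → List Char → List Char
  | [], _, res => res
  | c :: t, mx, res =>
    if mx < c then pvBLoop t c [c]
    else if c == mx then pvBLoop t mx (res ++ [c])
    else pvBLoop t mx res

def largestPalinSub_alt (s : String) : String :=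
  match s.toList with
  | [] => ""  -- s[0] raises IndexError here; excluded by Pre_
  | c0 :: t => String.mk (pvBLoop t c0 [c0])

-- ===== PRECONDITION & SPEC =====
-- A raises IndexError (s[0]) on the empty string; Pre_ excludes exactly that input.
def Pre_largestPalinSub (s : String) : Prop := s ≠ ""
instance (s : String) : Decidable (Pre_largestPalinSub s) := by unfold Pre_largestPalinSub; infer_instance
def pvWitness_largestPalinSub : String := "abcb"

def Spec_largestPalinSub (s : String) (out : String) : Prop := out = largestPalinSub_alt s
instance (s : String) (out : String) : Decidable (Spec_largestPalinSub s out) := by unfold Spec_largestPalinSub; infer_instance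

-- ===== CLAIM =====
def Claim_equal_largestPalinSub : Prop := ∀ (s : String), Dom_largestPalinSub s → Pre_largestPalinSub s → Spec_largestPalinSub s (largestPalinSub s)

-- ===== LEMMAS AND PROOFS =====
def pvMaxC : Char → List Char → Char
  | mx, [] => mx
  | mx, c :: t => pvMaxC (if mx < c then c else mx) t

theorem pvAMax_eq_maxC (t : List Char) : ∀ mx, pvAMax mx t = pvMaxC mx t := by
  induction t with
  | nil => intro mx; rfl
  | cons c t ih =>
    intro mx
    have h : Char.ofNat (max mx.toNat c.toNat) = if mx < c then c else mx := by
      by_cases h : mx < c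
      · have : mx.toNat < c.toNat := h
        simp [h, Nat.max_eq_right (Nat.le_of_lt this), Char.ofNat_toNat]
      · have : ¬ mx.toNat < c.toNat := h
        simp [h, Nat.max_eq_left (Nat.le_of_not_lt this), Char.ofNat_toNat]
    simp only [pvAMax, pvMaxC, h]
    exact ih _

theorem pvLe_maxC (t : List Char) : ∀ mx, mx ≤ pvMaxC mx t := by
  induction t with
  | nil => intro mx; exact le_refl _
  | cons c t ih =>
    intro mx
    simp only [pvMaxC]
    by_cases h : mx < c
    · simp only [h, if_pos]
      exact le_trans (le_of_lt h) (ih c)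
    · simp only [h, if_neg, not_false_iff]
      exact ih mx

theorem pvBLoop_eq (t : List Char) :
    ∀ mx res, pvBLoop t mx res =
      (if mx = pvMaxC mx t then res else []) ++ pvAFilter t (pvMaxC mx t) := by
  induction t with
  | nil => intro mx res; simp [pvBLoop, pvMaxC, pvAFilter]
  | cons c t ih =>
    intro mx res
    simp only [pvBLoop, pvMaxC, pvAFilter]
    by_cases h : mx < c
    · simp only [if_pos h]
      have hM : mx ≠ pvMaxC c t := ne_of_lt (lt_of_lt_of_le h (pvLe_maxC t c))
      rw [if_neg hM, ih]
      by_cases hcM : c = pvMaxC c t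
      · rw [if_pos hcM, beq_iff_eq.mpr hcM, if_pos rfl]
        rfl
      · rw [if_neg hcM, beq_eq_false_iff_ne.mpr hcM, if_neg (show ¬ (false = true) by decide)]
    · simp only [if_neg h]
      by_cases he : c = mx
      · rw [beq_iff_eq.mpr he, if_pos rfl, ih, he]
        by_cases hm : mx = pvMaxC mx t
        · rw [if_pos hm, if_pos hm, beq_iff_eq.mpr hm, if_pos rfl, hm, List.append_assoc]
          rfl
        · rw [if_neg hm, if_neg hm, beq_eq_false_iff_ne.mpr hm, if_neg (show ¬ (false = true) by decide)]
      · rw [beq_eq_false_iff_ne.mpr he, if_neg (show ¬ (false = true) by decide), ih]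
        have hcM : c ≠ pvMaxC mx t :=
          ne_of_lt (lt_of_lt_of_le (lt_of_le_of_ne (not_lt.mp h) he) (pvLe_maxC t mx))
        rw [beq_eq_false_iff_ne.mpr hcM, if_neg (show ¬ (false = true) by decide)]

-- ===== VERDICT =====
theorem largestPalinSub_spec : Claim_equal_largestPalinSub := by
  intro s _ hpre
  unfold Spec_largestPalinSub largestPalinSub largestPalinSub_alt
  cases hs : s.toList with
  | nil => rfl
  | cons c0 t =>
    show String.mk (pvAFilter (c0 :: t) (pvAMax c0 t)) = String.mk (pvBLoop t c0 [c0])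
    rw [pvAMax_eq_maxC, pvBLoop_eq]
    simp only [pvAFilter]
    by_cases h : c0 = pvMaxC c0 t
    · rw [if_pos h, beq_iff_eq.mpr h, if_pos rfl]
      rfl
    · rw [if_neg h, beq_eq_false_iff_ne.mpr h, if_neg (show ¬ (false = true) by decide)]
      rfl
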